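-- pv_equiv track=rewrite | github.com/BlocUnited-LLC/mozaiks-ai | workflows/AgentGenerator/tools/mermaid_sequence_diagram.py | _generate_fallback_diagram
-- ===== SOURCE A (Python) =====
-- from typing import Annotated, Any, Dict, List, Optional, Tuple
--
-- MANDATORY_PREFIX = "sequenceDiagram"
--
-- def _generate_fallback_diagram(legend: List[str], workflow_name: str) -> str:
--     """Generate a simple, guaranteed-valid Mermaid diagram from legend entries.
--
--     This is a fallback when the LLM-generated diagram has unfixable syntax errors.
--     Creates a basic linear flow: User -> M1 -> M2 -> ... -> User
--     """
--     if not legend: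
--         return f"{MANDATORY_PREFIX}\n    participant User\n\n    User->>User: No modules defined"
--
--     # Parse legend entries (format: "M1: Module Name")
--     participants = []
--     for entry in legend:
--         parts = entry.split(":", 1)
--         if len(parts) == 2:
--             alias = parts[0].strip()
--             name = parts[1].strip()
--             participants.append((alias, name))
--
--     if not participants:
--         return f"{MANDATORY_PREFIX}\n    participant User\n\n    User->>User: Invalid legend format"
--
--     # Build diagram
--     lines = [MANDATORY_PREFIX, "    participant User"]
--
--     # Declare all participants
--     for alias, name in participants:
--         # Truncate name to 12 chars max for Mermaid compatibility
--         short_name = name if len(name) <= 12 else name[:12]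
--         lines.append(f"    participant {alias} as {short_name}")
--
--     # Add blank line after participants (Mermaid requirement)
--     lines.append("")
--
--     # Create simple linear flow
--     if len(participants) == 1:
--         alias, name = participants[0]
--         lines.append(f"    User->>{alias}: Start {workflow_name}")
--         lines.append(f"    {alias}->>User: Complete")
--     else:
--         # User -> P1
--         lines.append(f"    User->>{participants[0][0]}: Start {workflow_name}")
--
--         # P1 -> P2 -> P3 -> ...
--         for i in range(len(participants) - 1):
--             curr_alias = participants[i][0]
--             next_alias = participants[i + 1][0]
--             lines.append(f"    {curr_alias}->>{next_alias}: Continue")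
--
--         # PN -> User
--         last_alias = participants[-1][0]
--         lines.append(f"    {last_alias}->>User: Complete")
--
--     return "\n".join(lines)
-- ===== SOURCE B (Python) =====
-- MANDATORY_PREFIX = "sequenceDiagram"
--
-- def _generate_fallback_diagram(legend, workflow_name):
--     """Same diagram, built declaratively: parse by comprehension, then walk the
--     node path User -> P1 -> ... -> PN -> User picking each message by edge position."""
--     if not legend:
--         return f"{MANDATORY_PREFIX}\n    participant User\n\n    User->>User: No modules defined"
--
--     participants = [(p[0].strip(), p[1].strip())
--                     for e in legend if len(p := e.split(":", 1)) == 2]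
--     if not participants:
--         return f"{MANDATORY_PREFIX}\n    participant User\n\n    User->>User: Invalid legend format"
--
--     decls = [f"    participant {alias} as {name[:12]}" for alias, name in participants]
--
--     nodes = ["User"] + [alias for alias, _ in participants] + ["User"]
--     n = len(nodes)
--     edges = []
--     for i in range(n - 1):
--         if i == 0:
--             msg = f"Start {workflow_name}"
--         elif i == n - 2:
--             msg = "Complete"
--         else:
--             msg = "Continue"
--         edges.append(f"    {nodes[i]}->>{nodes[i+1]}: {msg}")
--
--     return "\n".join([MANDATORY_PREFIX, "    participant User"] + decls + [""] + edges)
-- ===== Notes on version B (the rewrite author's own statement) =====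
-- stated objective: simpler
-- what changed: The legend parse and participant declarations become comprehensions, and A's if/else on the participant count plus its separate Start/Continue-loop/Complete appends are replaced by one uniform walk over the node path User -> P1 -> ... -> PN -> User, choosing each edge's message by its position (first = Start, last = Complete, middle = Continue).
import Mathlib
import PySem

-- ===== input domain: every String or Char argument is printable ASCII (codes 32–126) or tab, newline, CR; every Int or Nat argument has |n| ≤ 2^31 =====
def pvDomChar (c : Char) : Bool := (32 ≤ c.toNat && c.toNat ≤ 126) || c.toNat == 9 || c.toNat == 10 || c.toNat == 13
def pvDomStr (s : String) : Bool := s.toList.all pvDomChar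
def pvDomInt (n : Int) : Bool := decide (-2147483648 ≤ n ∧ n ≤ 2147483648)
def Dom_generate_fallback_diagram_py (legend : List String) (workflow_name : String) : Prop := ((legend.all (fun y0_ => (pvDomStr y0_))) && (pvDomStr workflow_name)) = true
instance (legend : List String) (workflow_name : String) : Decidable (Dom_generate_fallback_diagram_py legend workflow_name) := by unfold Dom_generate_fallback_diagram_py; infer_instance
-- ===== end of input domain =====

-- B builds the same diagram declaratively (comprehensions + one walk over the node path
-- User -> P1 -> ... -> PN -> User with the message chosen by edge position) instead of
-- A's branch on the number of participants; objective: simpler.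

-- ===== PORT A =====
def generate_fallback_diagram_py (legend : List String) (workflow_name : String) : String :=
  if legend = [] then
    "sequenceDiagram\n    participant User\n\n    User->>User: No modules defined"
  else
    let participants := legend.foldl (fun acc entry =>
      let parts := (PySem.Str.splitMax? entry ":" 1).getD []
      if PySem.List.len parts == 2 then
        acc ++ [(PySem.Str.strip (PySem.List.pyGetD parts 0 ""),
                 PySem.Str.strip (PySem.List.pyGetD parts 1 ""))]
      else acc) []
    if participants = [] then
      "sequenceDiagram\n    participant User\n\n    User->>User: Invalid legend format"
    else
      let lines := ["sequenceDiagram", "    participant User"]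
      let lines := participants.foldl (fun acc p =>
        let short := if PySem.Str.len p.2 ≤ 12 then p.2 else PySem.Str.slice p.2 none (some 12)
        acc ++ ["    participant " ++ p.1 ++ " as " ++ short]) lines
      let lines := lines ++ [""]
      let lines :=
        if PySem.List.len participants == 1 then
          let alias0 := (PySem.List.pyGetD participants 0 ("", "")).1
          lines ++ ["    User->>" ++ alias0 ++ ": Start " ++ workflow_name,
                    "    " ++ alias0 ++ "->>User: Complete"]
        else
          let lines := lines ++
            ["    User->>" ++ (PySem.List.pyGetD participants 0 ("", "")).1 ++ ": Start " ++ workflow_name]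
          let lines := (PySem.List.pyRange 0 (PySem.List.len participants - 1) 1).foldl
            (fun acc i =>
              acc ++ ["    " ++ (PySem.List.pyGetD participants i ("", "")).1 ++ "->>" ++
                      (PySem.List.pyGetD participants (i + 1) ("", "")).1 ++ ": Continue"]) lines
          lines ++ ["    " ++ (PySem.List.pyGetD participants (-1) ("", "")).1 ++ "->>User: Complete"]
      PySem.Str.join "\n" lines

-- ===== PORT B =====
def generate_fallback_diagram_py_alt (legend : List String) (workflow_name : String) : String :=
  if legend = [] then
    "sequenceDiagram\n    participant User\n\n    User->>User: No modules defined"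
  else
    let participants := legend.filterMap (fun e =>
      let p := (PySem.Str.splitMax? e ":" 1).getD []
      if PySem.List.len p == 2 then
        some (PySem.Str.strip (PySem.List.pyGetD p 0 ""),
              PySem.Str.strip (PySem.List.pyGetD p 1 ""))
      else none)
    if participants = [] then
      "sequenceDiagram\n    participant User\n\n    User->>User: Invalid legend format"
    else
      let decls := participants.map (fun p =>
        "    participant " ++ p.1 ++ " as " ++ PySem.Str.slice p.2 none (some 12))
      let nodes := "User" :: (participants.map Prod.fst ++ ["User"])
      let n := PySem.List.len nodes
      let edges := (PySem.List.pyRange 0 (n - 1) 1).foldl (fun acc i =>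
        let msg := if i == 0 then "Start " ++ workflow_name
                   else if i == n - 2 then "Complete"
                   else "Continue"
        acc ++ ["    " ++ PySem.List.pyGetD nodes i "" ++ "->>" ++
                PySem.List.pyGetD nodes (i + 1) "" ++ ": " ++ msg]) []
      PySem.Str.join "\n" (["sequenceDiagram", "    participant User"] ++ decls ++ [""] ++ edges)

-- ===== PRECONDITION & SPEC =====
def Spec_generate_fallback_diagram_py (legend : List String) (workflow_name : String) (out : String) : Prop := out = generate_fallback_diagram_py_alt legend workflow_name
instance (legend : List String) (workflow_name : String) (out : String) : Decidable (Spec_generate_fallback_diagram_py legend workflow_name out) := by unfold Spec_generate_fallback_diagram_py; infer_instance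

-- ===== CLAIM (what is proved, stated in full; the proofs are below) =====
def Claim_equal_generate_fallback_diagram_py : Prop := ∀ (legend : List String) (workflow_name : String), Dom_generate_fallback_diagram_py legend workflow_name → Spec_generate_fallback_diagram_py legend workflow_name (generate_fallback_diagram_py legend workflow_name)

-- ===== LEMMAS AND PROOFS =====

-- A's conditional truncation equals B's unconditional 12-slice.
lemma pv_short_eq (s : String) :
    (if PySem.Str.len s ≤ 12 then s else PySem.Str.slice s none (some 12)) =
      PySem.Str.slice s none (some 12) := by
  split_ifs with h
  · symm
    apply String.toList_inj.mp
    rw [PySem.Str.toList_slice]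
    simp only [PySem.Chars.slice_eq_listSlice]
    rw [PySem.List.slice_to (xs := s.toList) (b := 12) (by norm_num)]
    apply List.take_of_length_le
    have := PySem.Str.len_eq s
    omega
  · rfl

-- A's append-loop over the legend equals B's comprehension (filterMap).
lemma pv_parse_eq (legend : List String) :
    legend.foldl (fun acc entry =>
      let parts := (PySem.Str.splitMax? entry ":" 1).getD []
      if PySem.List.len parts == 2 then
        acc ++ [(PySem.Str.strip (PySem.List.pyGetD parts 0 ""),
                 PySem.Str.strip (PySem.List.pyGetD parts 1 ""))]
      else acc) [] =
    legend.filterMap (fun e =>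
      let p := (PySem.Str.splitMax? e ":" 1).getD []
      if PySem.List.len p == 2 then
        some (PySem.Str.strip (PySem.List.pyGetD p 0 ""),
              PySem.Str.strip (PySem.List.pyGetD p 1 ""))
      else none) := by
  simp only []
  rw [PySem.List.foldl_append_if
    (p := fun e => PySem.List.len ((PySem.Str.splitMax? e ":" 1).getD []) == 2)
    (f := fun e => (PySem.Str.strip (PySem.List.pyGetD ((PySem.Str.splitMax? e ":" 1).getD []) 0 ""),
                    PySem.Str.strip (PySem.List.pyGetD ((PySem.Str.splitMax? e ":" 1).getD []) 1 "")))]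
  rw [← List.filterMap_eq_map, ← List.filterMap_eq_filter, List.filterMap_filterMap]
  simp only [List.nil_append]
  congr 1; funext x
  by_cases h : ((((PySem.Str.splitMax? x ":" 1).getD []).length : Int) = 2) <;>
    simp [h, Option.guard]

-- indexing the alias part of the node path inside the participants
lemma pv_getD_mid (q : List (String × String)) (j : Nat) (hj : j < q.length) :
    ((q.map Prod.fst) ++ ["User"]).getD j "" = (q.getD j ("", "")).1 := by
  rw [List.getD_eq_getElem _ _ (by simp; omega), List.getD_eq_getElem _ _ hj,
      List.getElem_append_left (by simpa using hj)]
  simp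

-- node-path indexing with the head participant exposed
lemma pv_getD_mid' (p : String × String) (rest : List (String × String)) (j : Nat)
    (hj : j < rest.length + 1) :
    (p.1 :: List.map Prod.fst rest ++ ["User"]).getD j "" = ((p :: rest).getD j ("", "")).1 := by
  simpa using pv_getD_mid (p :: rest) j (by simpa using hj)

lemma pv_getD_last' (p : String × String) (rest : List (String × String)) :
    (p.1 :: List.map Prod.fst rest ++ ["User"]).getD (rest.length + 1) "" = "User" := by
  simp

-- ===== VERDICT (by name: the statement is the Claim_ definition above) =====
theorem generate_fallback_diagram_py_spec : Claim_equal_generate_fallback_diagram_py := by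
  intro legend wn _
  unfold Spec_generate_fallback_diagram_py generate_fallback_diagram_py generate_fallback_diagram_py_alt
  by_cases hleg : legend = []
  · simp [hleg]
  · simp only [if_neg hleg]
    rw [pv_parse_eq]
    set q := legend.filterMap (fun e =>
      let p := (PySem.Str.splitMax? e ":" 1).getD []
      if PySem.List.len p == 2 then
        some (PySem.Str.strip (PySem.List.pyGetD p 0 ""),
              PySem.Str.strip (PySem.List.pyGetD p 1 ""))
      else none) with hqdef
    clear_value q
    by_cases hq : q = []
    · simp [hq]
    · simp only [if_neg hq]
      congr 1
      simp only [pv_short_eq, PySem.List.foldl_append_singleton_eq_map, List.nil_append,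
                 List.append_assoc, PySem.List.len_eq]
      obtain ⟨p, rest, rfl⟩ := List.exists_cons_of_ne_nil hq
      by_cases hlen : rest = []
      · -- single participant: both sides are exactly the Start and Complete edges
        subst hlen
        rw [if_pos (by simp)]
        congr 1
        congr 1
        congr 1
        rw [show ((("User" :: (List.map Prod.fst [p] ++ ["User"])).length : Int) - 1) = (2 : Int)
              from by simp]
        rw [show PySem.List.pyRange 0 (2:Int) = [0, 1] from by decide]
        simp only [List.map_cons, List.map_nil]
        refine List.cons_eq_cons.mpr ⟨?_, List.cons_eq_cons.mpr ⟨?_, rfl⟩⟩ <;>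
          (apply String.toList_inj.mp;
           simp [String.toList_append, PySem.List.pyGetD, PySem.List.pyGet?, PySem.List.pyIdx?])
      · -- at least two participants
        obtain ⟨k, hkeq⟩ : ∃ k, rest.length = k + 1 := by
          cases rest with
          | nil => exact absurd rfl hlen
          | cons a t => exact ⟨t.length, by simp⟩
        rw [if_neg (by simp only [List.length_cons, hkeq, beq_iff_eq]; intro h; omega)]
        congr 1
        congr 1
        congr 1
        rw [show (((p :: rest).length : Int) - 1) = ((k + 1 : Nat) : Int) from by
              simp [hkeq]]
        rw [show ((("User" :: (List.map Prod.fst (p :: rest) ++ ["User"])).length : Int) - 1)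
              = (((k + 1) + 1 + 1 : Nat) : Int) from by simp [hkeq]]
        rw [PySem.List.pyRange_zero_natCast (k + 1),
            PySem.List.pyRange_zero_natCast ((k + 1) + 1 + 1)]
        rw [List.range_succ_eq_map (n := (k + 1) + 1), List.range_succ (n := k + 1)]
        simp only [List.map_cons, List.map_append, List.map_map, List.map_nil,
                   List.singleton_append, Nat.succ_eq_add_one]
        refine List.cons_eq_cons.mpr ⟨?_, ?_⟩
        · -- the Start edge
          simp only [Nat.cast_zero, zero_add]
          rw [if_pos (by simp)]
          rw [PySem.List.pyGetD_zero_cons, PySem.List.pyGetD_zero_cons,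
              PySem.List.pyGetD_ofNat' _ 1,
              show ("User" :: (p.1 :: List.map Prod.fst rest ++ ["User"])).getD 1 "" = p.1 from rfl]
          apply String.toList_inj.mp
          simp [String.toList_append]
        · congr 1
          · -- the Continue edges
            apply List.map_congr_left
            intro j hj
            simp only [List.mem_range] at hj
            simp only [Function.comp_apply, Nat.succ_eq_add_one]
            rw [if_neg (by simp only [beq_iff_eq]; push_cast; omega),
                if_neg (by simp only [beq_iff_eq, List.length_cons, List.length_append,
                  List.length_map, hkeq]; push_cast; omega)]
            rw [show ((j : Int) + 1) = ((j + 1 : Nat) : Int) from by push_cast; ring]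
            rw [show (((j + 1 : Nat) : Int) + 1) = ((j + 1 + 1 : Nat) : Int) from by push_cast; ring]
            simp only [PySem.List.pyGetD_natCast]
            rw [List.getD_cons_succ, List.getD_cons_succ, List.getD_cons_succ]
            rw [show rest.getD j ("", "") = (p :: rest).getD (j + 1) ("", "")
                  from (List.getD_cons_succ).symm]
            rw [pv_getD_mid' p rest j (by rw [hkeq]; omega), pv_getD_mid' p rest (j + 1) (by rw [hkeq]; omega)]
            apply String.toList_inj.mp
            simp [String.toList_append]
          · -- the Complete edge
            rw [if_neg (by simp only [beq_iff_eq]; push_cast; omega),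
                if_pos (by simp only [beq_iff_eq, List.length_cons, List.length_append,
                  List.length_map, List.length_nil, hkeq]; push_cast; omega)]
            rw [show (((k + 1) + 1 : Nat) : Int) + 1 = ((k + 1 + 1 + 1 : Nat) : Int) from by
                  push_cast; ring]
            simp only [PySem.List.pyGetD_natCast]
            rw [List.getD_cons_succ, List.getD_cons_succ]
            rw [pv_getD_mid' p rest (k + 1) (by rw [hkeq]; omega)]
            rw [show (k + 1 + 1 : Nat) = rest.length + 1 from by rw [hkeq], pv_getD_last' p rest]
            rw [PySem.List.pyGetD_neg_one _ ("", "") (by simp)]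
            rw [List.getLast_eq_getElem, List.getD_eq_getElem _ _ (by simp [hkeq])]
            refine List.cons_eq_cons.mpr ⟨?_, rfl⟩
            apply String.toList_inj.mp
            simp [String.toList_append, List.length_cons, hkeq]
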